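-- pv_equiv track=rewrite | github.com/Vipin-Baniya/EasyCode | code_analyzer.py | _build_tech_summary
-- ===== SOURCE A (Python) =====
-- def _build_tech_summary(
--
--     frameworks: list[str],
--     python_deps: list[str],
--     npm_deps: list[str],
-- ) -> str:
--     parts: list[str] = []
--     be = [f for f in frameworks if f in ("fastapi", "flask", "django", "express", "nestjs")]
--     fe = [f for f in frameworks if f in ("react", "vue", "nextjs")]
--     db = [f for f in frameworks if f in ("sqlalchemy", "prisma", "alembic")]
--     cache = [f for f in frameworks if f in ("redis", "celery")]
--
--     if be:
--         parts.append(f"Backend: {', '.join(be)}")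
--     if fe:
--         parts.append(f"Frontend: {', '.join(fe)}")
--     if db:
--         parts.append(f"Database ORM: {', '.join(db)}")
--     if cache:
--         parts.append(f"Queue/Cache: {', '.join(cache)}")
--     if "tailwindcss" in frameworks:
--         parts.append("Styling: Tailwind CSS")
--     if python_deps:
--         parts.append(f"Python packages: {len(python_deps)}")
--     if npm_deps:
--         parts.append(f"NPM packages: {len(npm_deps)}")
--
--     return " | ".join(parts) or "Tech stack not detected"
-- ===== SOURCE B (Python) =====
-- _CAT = {
--     "fastapi": "be", "flask": "be", "django": "be", "express": "be", "nestjs": "be",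
--     "react": "fe", "vue": "fe", "nextjs": "fe",
--     "sqlalchemy": "db", "prisma": "db", "alembic": "db",
--     "redis": "cache", "celery": "cache",
-- }
--
--
-- def _build_tech_summary(
--     frameworks: list[str],
--     python_deps: list[str],
--     npm_deps: list[str],
-- ) -> str:
--     be: list[str] = []
--     fe: list[str] = []
--     db: list[str] = []
--     cache: list[str] = []
--     buckets = {"be": be, "fe": fe, "db": db, "cache": cache}
--     for f in frameworks:
--         k = _CAT.get(f)
--         if k is not None:
--             buckets[k].append(f)
--
--     parts: list[str] = []
--     for label, bucket in (
--         ("Backend: ", be),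
--         ("Frontend: ", fe),
--         ("Database ORM: ", db),
--         ("Queue/Cache: ", cache),
--     ):
--         if bucket:
--             parts.append(label + ", ".join(bucket))
--     if "tailwindcss" in frameworks:
--         parts.append("Styling: Tailwind CSS")
--     if python_deps:
--         parts.append("Python packages: %d" % len(python_deps))
--     if npm_deps:
--         parts.append("NPM packages: %d" % len(npm_deps))
--
--     return " | ".join(parts) if parts else "Tech stack not detected"
-- ===== Notes on version B (the rewrite author's own statement) =====
-- stated objective: faster
-- what changed: Replaces A's four separate membership-filter scans of `frameworks` with a single table-driven pass that routes each framework into its category bucket via one lookup dict, and emits the labelled parts from a loop over (label, bucket) pairs instead of four hand-written blocks.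
import Mathlib
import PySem

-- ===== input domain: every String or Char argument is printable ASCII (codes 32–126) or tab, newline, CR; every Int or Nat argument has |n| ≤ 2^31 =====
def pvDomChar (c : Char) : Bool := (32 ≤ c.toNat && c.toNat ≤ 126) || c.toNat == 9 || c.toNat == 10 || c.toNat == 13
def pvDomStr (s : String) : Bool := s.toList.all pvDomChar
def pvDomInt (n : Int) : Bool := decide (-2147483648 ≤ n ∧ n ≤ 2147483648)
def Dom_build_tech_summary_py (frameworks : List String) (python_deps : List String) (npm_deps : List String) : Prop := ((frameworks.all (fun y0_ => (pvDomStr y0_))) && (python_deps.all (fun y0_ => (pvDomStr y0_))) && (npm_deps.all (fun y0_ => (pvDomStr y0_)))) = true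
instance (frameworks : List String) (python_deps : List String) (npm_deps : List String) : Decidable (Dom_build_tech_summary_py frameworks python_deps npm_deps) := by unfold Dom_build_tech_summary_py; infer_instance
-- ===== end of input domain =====

-- B replaces A's four membership-filter scans with one table-driven bucketing pass (alternative decomposition, same cost class).


-- ===== PORT A =====
def build_tech_summary_py (frameworks : List String) (python_deps : List String) (npm_deps : List String) : String :=
  let be := frameworks.filter (fun f => f == "fastapi" || f == "flask" || f == "django" || f == "express" || f == "nestjs")
  let fe := frameworks.filter (fun f => f == "react" || f == "vue" || f == "nextjs")
  let db := frameworks.filter (fun f => f == "sqlalchemy" || f == "prisma" || f == "alembic")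
  let cache := frameworks.filter (fun f => f == "redis" || f == "celery")
  let parts : List String := []
  let parts := if be.isEmpty then parts else parts ++ ["Backend: " ++ PySem.Str.join ", " be]
  let parts := if fe.isEmpty then parts else parts ++ ["Frontend: " ++ PySem.Str.join ", " fe]
  let parts := if db.isEmpty then parts else parts ++ ["Database ORM: " ++ PySem.Str.join ", " db]
  let parts := if cache.isEmpty then parts else parts ++ ["Queue/Cache: " ++ PySem.Str.join ", " cache]
  let parts := if frameworks.contains "tailwindcss" then parts ++ ["Styling: Tailwind CSS"] else parts
  let parts := if python_deps.isEmpty then parts else parts ++ ["Python packages: " ++ PySem.Int.toStr (python_deps.length : Int)]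
  let parts := if npm_deps.isEmpty then parts else parts ++ ["NPM packages: " ++ PySem.Int.toStr (npm_deps.length : Int)]
  -- `" | ".join(parts) or …`: the joined string is falsy exactly when it is empty
  let s := PySem.Str.join " | " parts
  if s == "" then "Tech stack not detected" else s

-- ===== PORT B =====
-- the module-level lookup table _CAT
def pvCat : PySem.Dict String String := PySem.Dict.ofList
  [("fastapi", "be"), ("flask", "be"), ("django", "be"), ("express", "be"), ("nestjs", "be"),
   ("react", "fe"), ("vue", "fe"), ("nextjs", "fe"),
   ("sqlalchemy", "db"), ("prisma", "db"), ("alembic", "db"),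
   ("redis", "cache"), ("celery", "cache")]

-- one iteration of B's bucketing loop: `k = _CAT.get(f); if k is not None: buckets[k].append(f)`
def pvBucketStep (st : List String × List String × List String × List String) (f : String) :
    List String × List String × List String × List String :=
  match PySem.Dict.get? pvCat f with
  | none => st
  | some k =>
    if k == "be" then (st.1 ++ [f], st.2.1, st.2.2.1, st.2.2.2)
    else if k == "fe" then (st.1, st.2.1 ++ [f], st.2.2.1, st.2.2.2)
    else if k == "db" then (st.1, st.2.1, st.2.2.1 ++ [f], st.2.2.2)
    else (st.1, st.2.1, st.2.2.1, st.2.2.2 ++ [f])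

def build_tech_summary_py_alt (frameworks : List String) (python_deps : List String) (npm_deps : List String) : String :=
  let bk := frameworks.foldl pvBucketStep ([], [], [], [])
  let parts := [("Backend: ", bk.1), ("Frontend: ", bk.2.1), ("Database ORM: ", bk.2.2.1), ("Queue/Cache: ", bk.2.2.2)].foldl
      (fun ps lb => if lb.2.isEmpty then ps else ps ++ [lb.1 ++ PySem.Str.join ", " lb.2]) []
  let parts := if frameworks.contains "tailwindcss" then parts ++ ["Styling: Tailwind CSS"] else parts
  let parts := if python_deps.isEmpty then parts else parts ++ ["Python packages: " ++ PySem.Int.toStr (python_deps.length : Int)]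
  let parts := if npm_deps.isEmpty then parts else parts ++ ["NPM packages: " ++ PySem.Int.toStr (npm_deps.length : Int)]
  if parts.isEmpty then "Tech stack not detected" else PySem.Str.join " | " parts

-- ===== PRECONDITION & SPEC =====
def Spec_build_tech_summary_py (frameworks : List String) (python_deps : List String) (npm_deps : List String) (out : String) : Prop := out = build_tech_summary_py_alt frameworks python_deps npm_deps
instance (frameworks : List String) (python_deps : List String) (npm_deps : List String) (out : String) : Decidable (Spec_build_tech_summary_py frameworks python_deps npm_deps out) := by unfold Spec_build_tech_summary_py; infer_instance

-- ===== CLAIM (what is proved, stated in full; the proofs are below) =====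
def Claim_equal_build_tech_summary_py : Prop := ∀ (frameworks : List String) (python_deps : List String) (npm_deps : List String), Dom_build_tech_summary_py frameworks python_deps npm_deps → Spec_build_tech_summary_py frameworks python_deps npm_deps (build_tech_summary_py frameworks python_deps npm_deps)

-- ===== LEMMAS AND PROOFS =====
-- one bucketing step appends f to exactly the bucket whose filter A's comprehension uses
theorem pvBucketStep_eq (a b c d : List String) (f : String) :
    pvBucketStep (a, b, c, d) f =
      (a ++ if f == "fastapi" || f == "flask" || f == "django" || f == "express" || f == "nestjs" then [f] else [],
       b ++ if f == "react" || f == "vue" || f == "nextjs" then [f] else [],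
       c ++ if f == "sqlalchemy" || f == "prisma" || f == "alembic" then [f] else [],
       d ++ if f == "redis" || f == "celery" then [f] else []) := by
  have hCat : pvCat = PySem.Dict.mk
      [("fastapi", "be"), ("flask", "be"), ("django", "be"), ("express", "be"), ("nestjs", "be"),
       ("react", "fe"), ("vue", "fe"), ("nextjs", "fe"),
       ("sqlalchemy", "db"), ("prisma", "db"), ("alembic", "db"),
       ("redis", "cache"), ("celery", "cache")] := by decide
  by_cases h1 : f = "fastapi"
  · subst h1; simp [pvBucketStep, hCat, PySem.Dict.get?_mk_cons]
  by_cases h2 : f = "flask"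
  · subst h2; simp [pvBucketStep, hCat, PySem.Dict.get?_mk_cons]
  by_cases h3 : f = "django"
  · subst h3; simp [pvBucketStep, hCat, PySem.Dict.get?_mk_cons]
  by_cases h4 : f = "express"
  · subst h4; simp [pvBucketStep, hCat, PySem.Dict.get?_mk_cons]
  by_cases h5 : f = "nestjs"
  · subst h5; simp [pvBucketStep, hCat, PySem.Dict.get?_mk_cons]
  by_cases h6 : f = "react"
  · subst h6; simp [pvBucketStep, hCat, PySem.Dict.get?_mk_cons]
  by_cases h7 : f = "vue"
  · subst h7; simp [pvBucketStep, hCat, PySem.Dict.get?_mk_cons]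
  by_cases h8 : f = "nextjs"
  · subst h8; simp [pvBucketStep, hCat, PySem.Dict.get?_mk_cons]
  by_cases h9 : f = "sqlalchemy"
  · subst h9; simp [pvBucketStep, hCat, PySem.Dict.get?_mk_cons]
  by_cases h10 : f = "prisma"
  · subst h10; simp [pvBucketStep, hCat, PySem.Dict.get?_mk_cons]
  by_cases h11 : f = "alembic"
  · subst h11; simp [pvBucketStep, hCat, PySem.Dict.get?_mk_cons]
  by_cases h12 : f = "redis"
  · subst h12; simp [pvBucketStep, hCat, PySem.Dict.get?_mk_cons]
  by_cases h13 : f = "celery"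
  · subst h13; simp [pvBucketStep, hCat, PySem.Dict.get?_mk_cons]
  have hnone : PySem.Dict.get? pvCat f = none := by
    simp [hCat, PySem.Dict.get?_mk_cons, PySem.Dict.get?, beq_iff_eq, Ne.symm h1, Ne.symm h2, Ne.symm h3, Ne.symm h4, Ne.symm h5, Ne.symm h6, Ne.symm h7, Ne.symm h8, Ne.symm h9, Ne.symm h10, Ne.symm h11, Ne.symm h12, Ne.symm h13]
  simp [pvBucketStep, hnone, beq_iff_eq, h1, h2, h3, h4, h5, h6, h7, h8, h9, h10, h11, h12, h13]

-- the single pass computes exactly A's four filtered lists (appended to each accumulator)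
theorem pvBucket_foldl (fs : List String) (a b c d : List String) :
    fs.foldl pvBucketStep (a, b, c, d) =
      (a ++ fs.filter (fun f => f == "fastapi" || f == "flask" || f == "django" || f == "express" || f == "nestjs"),
       b ++ fs.filter (fun f => f == "react" || f == "vue" || f == "nextjs"),
       c ++ fs.filter (fun f => f == "sqlalchemy" || f == "prisma" || f == "alembic"),
       d ++ fs.filter (fun f => f == "redis" || f == "celery")) := by
  induction fs generalizing a b c d with
  | nil => simp
  | cons f rest ih =>
    simp only [List.foldl_cons, pvBucketStep_eq, ih, List.filter_cons]
    simp only [Prod.mk.injEq]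
    refine ⟨?_, ?_, ?_, ?_⟩ <;> split <;> simp

-- the joined string of a list of nonempty parts is empty only for the empty list
theorem pvJoin_ne (p : String) (rest : List String) (hp : p.toList ≠ []) :
    (PySem.Str.join " | " (p :: rest) == "") = false := by
  rw [beq_eq_false_iff_ne]
  intro h
  have h2 := congrArg String.toList h
  rw [PySem.Str.toList_join] at h2
  cases rest with
  | nil => rw [List.map_cons, List.map_nil, PySem.Chars.join_singleton] at h2; exact hp h2
  | cons q t =>
    rw [List.map_cons, List.map_cons, PySem.Chars.join_cons_cons] at h2
    rw [List.append_assoc] at h2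
    exact hp (List.append_eq_nil_iff.mp h2).1

-- A tests the falsiness of the joined string, B tests emptiness of the parts list: equal when no part is ""
theorem pvFinal (parts : List String) (h : ∀ p ∈ parts, ¬ p = "") :
    (if (PySem.Str.join " | " parts == "") = true then "Tech stack not detected" else PySem.Str.join " | " parts)
      = if parts.isEmpty = true then "Tech stack not detected" else PySem.Str.join " | " parts := by
  cases parts with
  | nil => decide
  | cons p rest =>
    have hp : p.toList ≠ [] := fun hl => h p (by simp) (String.toList_inj.mp hl)
    rw [pvJoin_ne p rest hp]
    simp

-- a conditional append of a nonempty string keeps every part nonempty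
theorem pvChainMem {c : Prop} [Decidable c] (acc : List String) (x : String)
    (hacc : ∀ p ∈ acc, ¬ p = "") (hx : ¬ x = "") :
    ∀ p ∈ (if c then acc ++ [x] else acc), ¬ p = "" := by
  split
  · intro p hp
    rcases List.mem_append.mp hp with h | h
    · exact hacc p h
    · rw [List.mem_singleton] at h; subst h; exact hx
  · exact hacc

theorem pvChainMem' {c : Prop} [Decidable c] (acc : List String) (x : String)
    (hacc : ∀ p ∈ acc, ¬ p = "") (hx : ¬ x = "") :
    ∀ p ∈ (if c then acc else acc ++ [x]), ¬ p = "" := by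
  split
  · exact hacc
  · intro p hp
    rcases List.mem_append.mp hp with h | h
    · exact hacc p h
    · rw [List.mem_singleton] at h; subst h; exact hx

-- a string with a nonempty prefix is nonempty
theorem pvAppend_ne (s t : String) (hs : s.toList ≠ []) : ¬ (s ++ t = "") := by
  intro h
  have h2 := congrArg String.toList h
  rw [String.toList_append] at h2
  exact hs (List.append_eq_nil_iff.mp h2).1

-- ===== VERDICT (by name: the statement is the Claim_ definition above) =====
theorem build_tech_summary_py_spec : Claim_equal_build_tech_summary_py := by
  intro frameworks python_deps npm_deps _
  show build_tech_summary_py frameworks python_deps npm_deps = build_tech_summary_py_alt frameworks python_deps npm_deps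
  simp only [build_tech_summary_py, build_tech_summary_py_alt, pvBucket_foldl, List.nil_append,
    List.foldl_cons, List.foldl_nil]
  refine pvFinal _ ?_
  exact pvChainMem' _ _
    (pvChainMem' _ _
      (pvChainMem _ _
        (pvChainMem' _ _
          (pvChainMem' _ _
            (pvChainMem' _ _
              (pvChainMem' _ _ (by simp) (pvAppend_ne _ _ (by decide)))
              (pvAppend_ne _ _ (by decide)))
            (pvAppend_ne _ _ (by decide)))
          (pvAppend_ne _ _ (by decide)))
        (by decide))
      (pvAppend_ne _ _ (by decide)))
    (pvAppend_ne _ _ (by decide))
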